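-- pv_equiv track=rewrite | github.com/kkris/adventofcode | day/01/floor.py | calculate_floor
-- ===== SOURCE A (Python) =====
-- def calculate_floor(instructions):
--     floor = 0
--     first_basement_entry = 0
--
--     for pos, instruction in enumerate(instructions):
--         if instruction == '(':
--             floor += 1
--         elif instruction == ')':
--             floor -= 1
--         else:
--             raise ValueError("Did not expect instruction " + instruction)
--
--         if floor == -1 and first_basement_entry == 0:
--             first_basement_entry = pos + 1
--
--     return floor, first_basement_entry
-- ===== SOURCE B (Python) =====
-- def _first_basement(instructions):
--     depth = 0
--     for pos, ch in enumerate(instructions):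
--         depth += 1 if ch == '(' else -1
--         if depth == -1:
--             return pos + 1
--     return 0
--
--
-- def calculate_floor(instructions):
--     for ch in instructions:
--         if ch not in '()':
--             raise ValueError("Did not expect instruction " + ch)
--     floor = instructions.count('(') - instructions.count(')')
--     return floor, _first_basement(instructions)
-- ===== Notes on version B (the rewrite author's own statement) =====
-- stated objective: simpler
-- what changed: Replaces the single stateful loop maintaining both floor and first_basement_entry by three separate concerns: a validation pass, floor via str.count('(') - str.count(')'), and an early-returning depth scan for the first basement entry.
import Mathlib
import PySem

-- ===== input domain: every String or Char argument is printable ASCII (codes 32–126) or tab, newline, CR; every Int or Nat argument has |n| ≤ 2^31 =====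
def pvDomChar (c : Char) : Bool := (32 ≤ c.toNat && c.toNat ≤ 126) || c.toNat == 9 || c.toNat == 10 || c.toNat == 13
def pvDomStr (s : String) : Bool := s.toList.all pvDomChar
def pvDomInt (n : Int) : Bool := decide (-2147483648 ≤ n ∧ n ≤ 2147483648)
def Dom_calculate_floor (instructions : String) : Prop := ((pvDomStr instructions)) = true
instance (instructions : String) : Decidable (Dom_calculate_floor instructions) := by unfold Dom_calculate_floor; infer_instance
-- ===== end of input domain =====

-- B splits A's single stateful loop into validation, floor via count('(')-count(')'), and an
-- early-returning depth scan for the first basement entry; objective: simpler decomposition.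

-- ===== PORT A =====
-- the loop of A: state (floor, first_basement_entry), position counter pos
def calcA_go : List Char → Int → Int → Int → Int × Int
  | [], floor, first, _ => (floor, first)
  | instruction :: rest, floor, first, pos =>
    let floor' := if instruction = '(' then floor + 1
      else if instruction = ')' then floor - 1
      else floor  -- Python raises ValueError here; such inputs are excluded by Pre_
    let first' := if floor' = -1 ∧ first = 0 then pos + 1 else first
    calcA_go rest floor' first' (pos + 1)

def calculate_floor (instructions : String) : Int × Int :=
  calcA_go instructions.toList 0 0 0

-- ===== PORT B =====
-- B's helper _first_basement: running depth, returns pos+1 at the first depth -1, else 0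
def calcB_first : List Char → Int → Int → Int
  | [], _, _ => 0
  | ch :: rest, depth, pos =>
    let d := depth + (if ch = '(' then 1 else -1)
    if d = -1 then pos + 1 else calcB_first rest d (pos + 1)

-- B's validation loop raises on any char outside '()'; excluded by Pre_, a no-op inside it
def calculate_floor_alt (instructions : String) : Int × Int :=
  ((PySem.Str.count instructions "(" : Int) - (PySem.Str.count instructions ")" : Int),
   calcB_first instructions.toList 0 0)

-- ===== PRECONDITION & SPEC =====
-- Pre_ excludes exactly the inputs with a character other than '(' or ')', on which both
-- A and B raise ValueError.
def Pre_calculate_floor (instructions : String) : Prop :=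
  (instructions.toList.all fun c => c = '(' || c = ')') = true
instance (instructions : String) : Decidable (Pre_calculate_floor instructions) := by
  unfold Pre_calculate_floor; infer_instance

def pvWitness_calculate_floor : String := "()"

def Spec_calculate_floor (instructions : String) (out : Int × Int) : Prop := out = calculate_floor_alt instructions
instance (instructions : String) (out : Int × Int) : Decidable (Spec_calculate_floor instructions out) := by unfold Spec_calculate_floor; infer_instance

-- ===== CLAIM (what is proved, stated in full; the proofs are below) =====
def Claim_equal_calculate_floor : Prop := ∀ (instructions : String), Dom_calculate_floor instructions → Pre_calculate_floor instructions → Spec_calculate_floor instructions (calculate_floor instructions)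

-- ===== LEMMAS AND PROOFS =====

-- PySem.Chars.count with a single-character needle is List.count (no named PySem lemma covers this case)
lemma count_go_single (c : Char) : ∀ (l : List Char) (fuel acc : Nat), l.length ≤ fuel →
    PySem.Chars.count.go [c] fuel l acc = acc + l.count c := by
  intro l
  induction l with
  | nil => intro fuel acc _; cases fuel <;> simp [PySem.Chars.count.go]
  | cons h t ih =>
    intro fuel acc hf
    cases fuel with
    | zero => simp at hf
    | succ n =>
      simp only [PySem.Chars.count.go, List.isPrefixOf, List.count_cons]
      by_cases hc : c = h
      · subst hc
        simp only [beq_self_eq_true, Bool.true_and, if_true]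
        rw [show List.drop [c].length (c :: t) = t from rfl,
          ih n (acc + 1) (by simpa using Nat.le_of_succ_le_succ hf)]
        omega
      · have hbc : (c == h) = false := beq_eq_false_iff_ne.mpr hc
        simp only [hbc, Bool.false_and, Bool.false_eq_true, if_false]
        rw [ih n acc (by simpa using Nat.le_of_succ_le_succ hf)]
        have : (h == c) = false := beq_eq_false_iff_ne.mpr (Ne.symm hc)
        simp [this]

lemma str_count_single (s : String) (c : Char) (sub : String) (hsub : sub.toList = [c]) :
    PySem.Str.count s sub = s.toList.count c := by
  simp only [PySem.Str.count_eq, hsub]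
  unfold PySem.Chars.count
  simp only [List.isEmpty_cons, Bool.false_eq_true, if_false]
  rw [count_go_single c s.toList _ 0 (by simp)]
  omega

-- once first_basement_entry is nonzero, A never changes it
lemma calcA_go_frozen : ∀ (l : List Char) (f first pos : Int), first ≠ 0 →
    (calcA_go l f first pos).2 = first := by
  intro l
  induction l with
  | nil => intro f first pos _; rfl
  | cons h t ih =>
    intro f first pos hne
    have hfl : (if (if h = '(' then f + 1 else if h = ')' then f - 1 else f) = -1 ∧ first = 0
        then pos + 1 else first) = first := if_neg (fun hc => hne hc.2)
    simp only [calcA_go, hfl]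
    exact ih _ _ _ hne

-- A's floor component is the count difference, independent of first/pos
lemma calcA_go_fst : ∀ (l : List Char) (f first pos : Int), (∀ c ∈ l, c = '(' ∨ c = ')') →
    (calcA_go l f first pos).1 = f + (l.count '(' : Int) - (l.count ')' : Int) := by
  intro l
  induction l with
  | nil => intro f first pos _; simp [calcA_go]
  | cons h t ih =>
    intro f first pos hv
    have hvt : ∀ c ∈ t, c = '(' ∨ c = ')' := fun c hc => hv c (List.mem_cons_of_mem _ hc)
    rcases hv h (List.mem_cons_self) with hh | hh <;>
      · subst hh
        simp only [calcA_go, List.count_cons]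
        rw [ih _ _ _ hvt]
        simp
        omega

-- A's basement component (while still unset) equals B's early-returning scan
lemma calcA_go_snd : ∀ (l : List Char) (f pos : Int), 0 ≤ pos → (∀ c ∈ l, c = '(' ∨ c = ')') →
    (calcA_go l f 0 pos).2 = calcB_first l f pos := by
  intro l
  induction l with
  | nil => intro f pos _ _; rfl
  | cons h t ih =>
    intro f pos hpos hv
    have hvt : ∀ c ∈ t, c = '(' ∨ c = ')' := fun c hc => hv c (List.mem_cons_of_mem _ hc)
    rcases hv h (List.mem_cons_self) with hh | hh <;> subst hh
    · by_cases hd : f + 1 = -1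
      · simp [calcA_go, calcB_first, hd]
        exact calcA_go_frozen t _ _ _ (by omega)
      · simp [calcA_go, calcB_first, hd, ih (f + 1) (pos + 1) (by omega) hvt]
    · by_cases hd : f - 1 = -1
      · have h2 : f + (-1 : Int) = -1 := by omega
        simp [calcA_go, calcB_first, hd, h2]
        exact calcA_go_frozen t _ _ _ (by omega)
      · have h3 : f + (-1 : Int) = f - 1 := by ring
        simp [calcA_go, calcB_first, hd, h3, ih (f - 1) (pos + 1) (by omega) hvt]

-- ===== VERDICT (by name: the statement is the Claim_ definition above) =====
theorem calculate_floor_spec : Claim_equal_calculate_floor := by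
  intro s _ hpre0
  have hpre : ∀ c ∈ s.toList, c = '(' ∨ c = ')' := by
    intro c hc
    have := List.all_eq_true.mp hpre0 c hc
    simpa using this
  unfold Spec_calculate_floor calculate_floor calculate_floor_alt
  have h1 : (calcA_go s.toList 0 0 0).1 = (s.toList.count '(' : Int) - (s.toList.count ')' : Int) := by
    rw [calcA_go_fst s.toList 0 0 0 hpre]; ring
  have h2 : (calcA_go s.toList 0 0 0).2 = calcB_first s.toList 0 0 :=
    calcA_go_snd s.toList 0 0 le_rfl hpre
  have hc1 : PySem.Str.count s "(" = s.toList.count '(' := str_count_single s '(' "(" rfl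
  have hc2 : PySem.Str.count s ")" = s.toList.count ')' := str_count_single s ')' ")" rfl
  rw [Prod.ext_iff]
  exact ⟨by rw [h1, hc1, hc2], by rw [h2]⟩
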